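-- pv_equiv track=rewrite | github.com/Pitrified/shelf-mind | src/shelf_mind/infrastructure/metadata/metadata_enricher.py | _detect_room
-- ===== SOURCE A (Python) =====
-- _ROOM_KEYWORDS: dict[str, list[str]] = {
--     "kitchen": ["kitchen", "cook", "bake", "food", "dish"],
--     "bedroom": ["bed", "sleep", "pillow", "mattress", "nightstand"],
--     "bathroom": ["bath", "shower", "toilet", "sink"],
--     "living room": ["couch", "sofa", "tv", "television", "remote"],
--     "garage": ["car", "tool", "drill", "saw", "wrench"],
--     "office": ["desk", "computer", "monitor", "keyboard", "pen", "paper"],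
--     "laundry": ["wash", "iron", "dryer", "detergent"],
-- }
--
-- def _detect_room(tokens: set[str]) -> str | None:
--     """Match tokens against room keyword lists.
--
--     Args:
--         tokens: Lowercased words from name+description.
--
--     Returns:
--         Detected room hint or None.
--     """
--     best_room = None
--     best_score = 0
--     for room, keywords in _ROOM_KEYWORDS.items():
--         score = sum(1 for kw in keywords if kw in tokens)
--         if score > best_score:
--             best_score = score
--             best_room = room
--     return best_room
-- ===== SOURCE B (Python) =====
-- _ROOM_KEYWORDS: dict[str, list[str]] = {
--     "kitchen": ["kitchen", "cook", "bake", "food", "dish"],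
--     "bedroom": ["bed", "sleep", "pillow", "mattress", "nightstand"],
--     "bathroom": ["bath", "shower", "toilet", "sink"],
--     "living room": ["couch", "sofa", "tv", "television", "remote"],
--     "garage": ["car", "tool", "drill", "saw", "wrench"],
--     "office": ["desk", "computer", "monitor", "keyboard", "pen", "paper"],
--     "laundry": ["wash", "iron", "dryer", "detergent"],
-- }
--
-- # Inverted index: keyword -> room (built once; no keyword belongs to two rooms).
-- _KEYWORD_TO_ROOM: dict[str, str] = {
--     kw: room for room, kws in _ROOM_KEYWORDS.items() for kw in kws
-- }
--
--
-- def _detect_room(tokens: set[str]) -> str | None: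
--     scores: dict[str, int] = {}
--     for token in tokens:
--         room = _KEYWORD_TO_ROOM.get(token)
--         if room is not None:
--             scores[room] = scores.get(room, 0) + 1
--     best_room = None
--     best_score = 0
--     for room in _ROOM_KEYWORDS:
--         s = scores.get(room, 0)
--         if s > best_score:
--             best_score = s
--             best_room = room
--     return best_room
-- ===== Notes on version B (the rewrite author's own statement) =====
-- stated objective: idiomatic
-- what changed: Replaces the per-room scan over every keyword list with a keyword->room inverted index built once, a single counting pass over the tokens, and a final scan over the rooms in dict order with the same strict-> tie-breaking.
import Mathlib
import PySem

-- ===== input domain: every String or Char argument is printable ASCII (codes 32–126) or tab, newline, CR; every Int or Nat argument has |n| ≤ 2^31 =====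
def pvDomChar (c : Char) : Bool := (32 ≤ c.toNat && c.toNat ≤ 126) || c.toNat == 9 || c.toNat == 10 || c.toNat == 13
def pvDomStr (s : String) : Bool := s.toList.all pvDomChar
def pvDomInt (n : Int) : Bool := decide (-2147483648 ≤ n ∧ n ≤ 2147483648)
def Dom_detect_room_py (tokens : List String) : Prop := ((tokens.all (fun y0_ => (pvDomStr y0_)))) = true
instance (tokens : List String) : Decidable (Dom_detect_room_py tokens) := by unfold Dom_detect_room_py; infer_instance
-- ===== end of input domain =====

-- B replaces A's rooms×keywords scan with an inverted keyword→room index and one counting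
-- pass over the tokens (idiomatic; same winner and tie-breaking by dict insertion order).

-- ===== PORT A =====
-- the module constant _ROOM_KEYWORDS (a dict: association list in insertion order)
def pvRoomKeywords : List (String × List String) :=
  [("kitchen", ["kitchen", "cook", "bake", "food", "dish"]),
   ("bedroom", ["bed", "sleep", "pillow", "mattress", "nightstand"]),
   ("bathroom", ["bath", "shower", "toilet", "sink"]),
   ("living room", ["couch", "sofa", "tv", "television", "remote"]),
   ("garage", ["car", "tool", "drill", "saw", "wrench"]),
   ("office", ["desk", "computer", "monitor", "keyboard", "pen", "paper"]),
   ("laundry", ["wash", "iron", "dryer", "detergent"])]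

-- literal port of A: for each room, score = sum(1 for kw in keywords if kw in tokens);
-- keep (best_room, best_score), strict '>' so ties keep the earlier room.
def detect_room_py (tokens : List String) : Option String :=
  (pvRoomKeywords.foldl
    (fun (st : Option String × Int) rk =>
      let score : Int := rk.2.foldl (fun acc kw => if kw ∈ tokens then acc + 1 else acc) 0
      if score > st.2 then (some rk.1, score) else st)
    (none, 0)).1

-- ===== PORT B =====
-- _KEYWORD_TO_ROOM: the inverted index, built once from _ROOM_KEYWORDS
def pvKeywordToRoom : PySem.Dict String String :=
  pvRoomKeywords.foldl (fun d rk => rk.2.foldl (fun d kw => d.insert kw rk.1) d) PySem.Dict.empty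

-- literal port of B: tokens is a Python set, so B's Python iterates its distinct
-- elements — PySem.Set.ofList tokens is exactly that list; then one counting pass
-- and a final scan over the rooms in insertion order with strict '>'.
def detect_room_py_alt (tokens : List String) : Option String :=
  let scores : PySem.Dict String Int :=
    (PySem.Set.ofList tokens).foldl
      (fun d t =>
        match pvKeywordToRoom.get? t with
        | some room => d.modify room 0 (· + 1)
        | none => d)
      PySem.Dict.empty
  (pvRoomKeywords.foldl
    (fun (st : Option String × Int) rk =>
      let s : Int := scores.getD rk.1 0
      if s > st.2 then (some rk.1, s) else st)
    (none, 0)).1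

-- ===== PRECONDITION & SPEC =====
def Spec_detect_room_py (tokens : List String) (out : Option String) : Prop := out = detect_room_py_alt tokens
instance (tokens : List String) (out : Option String) : Decidable (Spec_detect_room_py tokens out) := by unfold Spec_detect_room_py; infer_instance

-- ===== CLAIM (what is proved, stated in full; the proofs are below) =====
def Claim_equal_detect_room_py : Prop := ∀ (tokens : List String), Dom_detect_room_py tokens → Spec_detect_room_py tokens (detect_room_py tokens)

-- ===== LEMMAS AND PROOFS =====

-- the counting loop: the score recorded for room r counts the tokens the index sends to r
theorem getD_score_fold (l : List String) (d0 : PySem.Dict String Int) (r : String) :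
    (l.foldl
      (fun d t =>
        match pvKeywordToRoom.get? t with
        | some room => d.modify room 0 (· + 1)
        | none => d) d0).getD r 0
      = d0.getD r 0 + (l.countP (fun t => pvKeywordToRoom.get? t == some r) : Int) := by
  induction l generalizing d0 with
  | nil => simp
  | cons t l ih =>
    rw [List.foldl_cons, List.countP_cons]
    cases h : pvKeywordToRoom.get? t with
    | none => simp [ih]
    | some room =>
      rw [ih]
      by_cases hr : room = r
      · subst hr
        rw [PySem.Dict.getD_modify_self]
        simp
        omega
      · rw [PySem.Dict.getD_modify_of_ne _ _ _ (Ne.symm hr)]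
        have hb : (some room == some r) = false := by
          simpa using hr
        rw [hb]
        simp

-- counting the members of one nodup list inside another is symmetric
theorem countP_mem_comm (l1 l2 : List String) (h1 : l1.Nodup) (h2 : l2.Nodup) :
    l1.countP (fun x => decide (x ∈ l2)) = l2.countP (fun x => decide (x ∈ l1)) := by
  rw [List.countP_eq_length_filter, List.countP_eq_length_filter]
  refine List.Perm.length_eq ?_
  rw [List.perm_ext_iff_of_nodup (h1.filter _) (h2.filter _)]
  intro a
  simp only [List.mem_filter, decide_eq_true_eq]
  tauto

-- the inverted index: get? t = some r ↔ (t, r) is one of its (concrete) items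
set_option maxRecDepth 4000 in
theorem idx_get?_iff (t r : String) :
    pvKeywordToRoom.get? t = some r ↔ (t, r) ∈ pvKeywordToRoom.items :=
  PySem.Dict.get?_eq_some_iff_mem_items _ _ _ (by decide)

set_option maxRecDepth 8000 in
-- per room of _ROOM_KEYWORDS: the index sends t to that room iff t is one of its keywords
theorem idx_room (rk : String × List String) (hrk : rk ∈ pvRoomKeywords) (t : String) :
    (pvKeywordToRoom.get? t == some rk.1) = decide (t ∈ rk.2) := by
  fin_cases hrk <;>
    · rw [Bool.eq_iff_iff, beq_iff_eq, decide_eq_true_eq, idx_get?_iff]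
      simp [show pvKeywordToRoom.items =
        [("kitchen", "kitchen"), ("cook", "kitchen"), ("bake", "kitchen"),
         ("food", "kitchen"), ("dish", "kitchen"),
         ("bed", "bedroom"), ("sleep", "bedroom"), ("pillow", "bedroom"),
         ("mattress", "bedroom"), ("nightstand", "bedroom"),
         ("bath", "bathroom"), ("shower", "bathroom"), ("toilet", "bathroom"),
         ("sink", "bathroom"),
         ("couch", "living room"), ("sofa", "living room"), ("tv", "living room"),
         ("television", "living room"), ("remote", "living room"),
         ("car", "garage"), ("tool", "garage"), ("drill", "garage"),
         ("saw", "garage"), ("wrench", "garage"),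
         ("desk", "office"), ("computer", "office"), ("monitor", "office"),
         ("keyboard", "office"), ("pen", "office"), ("paper", "office"),
         ("wash", "laundry"), ("iron", "laundry"), ("dryer", "laundry"),
         ("detergent", "laundry")] from rfl, Prod.ext_iff]

set_option maxRecDepth 8000 in
-- for each room, B's recorded score equals A's freshly computed score
theorem score_eq (tokens : List String) (rk : String × List String) (hrk : rk ∈ pvRoomKeywords) :
    ((PySem.Set.ofList tokens).foldl
      (fun d t =>
        match pvKeywordToRoom.get? t with
        | some room => d.modify room 0 (· + 1)
        | none => d) (PySem.Dict.empty : PySem.Dict String Int)).getD rk.1 0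
      = rk.2.foldl (fun acc kw => if kw ∈ tokens then acc + 1 else acc) (0 : Int) := by
  rw [getD_score_fold, PySem.Dict.getD_empty, PySem.List.foldl_ite_add_one, zero_add, zero_add]
  congr 1
  have hcnt : (PySem.Set.ofList tokens).countP (fun t => pvKeywordToRoom.get? t == some rk.1)
      = (PySem.Set.ofList tokens).countP (fun t => decide (t ∈ rk.2)) := by
    apply List.countP_congr
    intro t _
    rw [idx_room rk hrk t]
  have hnd : rk.2.Nodup := by fin_cases hrk <;> decide
  rw [hcnt, countP_mem_comm _ _ (PySem.Set.nodup_ofList tokens) hnd]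
  apply List.countP_congr
  intro kw _
  simp [PySem.Set.mem_ofList]

-- ===== VERDICT (by name: the statement is the Claim_ definition above) =====
theorem detect_room_py_spec : Claim_equal_detect_room_py := by
  intro tokens _
  unfold Spec_detect_room_py detect_room_py detect_room_py_alt
  congr 1
  apply PySem.List.foldl_congr_mem
  intro st rk hrk
  simp only [score_eq tokens rk hrk]
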